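-- pv_equiv track=rewrite | github.com/IT-Academic-Research-Services/seqtoid-pipelines | scripts/reference-taxa-download.py | filter_taxid_blocks
-- ===== SOURCE A (Python) =====
-- SCIENTIFIC_NAME_TAG = 'scientific name'
--
-- SYNONYM_NAME_TAG = 'synonym'
--
-- def filter_taxid_blocks(taxid_blocks_dict):
--     taxids = {}
--     for taxid, name_data in taxid_blocks_dict.items():
--         final_name = "N/A"
--         final_name_type = "N/A"
--
--         for name_datum in name_data:
--             name_candidate = name_datum[0]
--             name_type_candidate = name_datum[1]
--             if SCIENTIFIC_NAME_TAG in name_type_candidate: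
--
--                 final_name = name_candidate
--                 final_name_type = name_type_candidate
--                 break
--             elif SYNONYM_NAME_TAG in name_type_candidate:
--                 final_name = name_candidate
--                 final_name_type = name_type_candidate
--         taxids[taxid] = [final_name, final_name_type]
--     return taxids
-- ===== SOURCE B (Python) =====
-- SCIENTIFIC_NAME_TAG = 'scientific name'
--
-- SYNONYM_NAME_TAG = 'synonym'
--
-- def filter_taxid_blocks(taxid_blocks_dict):
--     result = {}
--     for taxid, name_data in taxid_blocks_dict.items():
--         sci = next((nd for nd in name_data if SCIENTIFIC_NAME_TAG in nd[1]), None)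
--         if sci is not None:
--             chosen = [sci[0], sci[1]]
--         else:
--             syns = [nd for nd in name_data if SYNONYM_NAME_TAG in nd[1]]
--             if syns:
--                 chosen = [syns[-1][0], syns[-1][1]]
--             else:
--                 chosen = ["N/A", "N/A"]
--         result[taxid] = chosen
--     return result
-- ===== Notes on version B (the rewrite author's own statement) =====
-- stated objective: alternative
-- what changed: Replaces A's single break/overwrite loop per taxid block with two independent selection passes: take the first scientific-name entry (next over a lazy generator), otherwise the last synonym entry from a filter, otherwise the N/A placeholder pair.
import Mathlib
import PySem

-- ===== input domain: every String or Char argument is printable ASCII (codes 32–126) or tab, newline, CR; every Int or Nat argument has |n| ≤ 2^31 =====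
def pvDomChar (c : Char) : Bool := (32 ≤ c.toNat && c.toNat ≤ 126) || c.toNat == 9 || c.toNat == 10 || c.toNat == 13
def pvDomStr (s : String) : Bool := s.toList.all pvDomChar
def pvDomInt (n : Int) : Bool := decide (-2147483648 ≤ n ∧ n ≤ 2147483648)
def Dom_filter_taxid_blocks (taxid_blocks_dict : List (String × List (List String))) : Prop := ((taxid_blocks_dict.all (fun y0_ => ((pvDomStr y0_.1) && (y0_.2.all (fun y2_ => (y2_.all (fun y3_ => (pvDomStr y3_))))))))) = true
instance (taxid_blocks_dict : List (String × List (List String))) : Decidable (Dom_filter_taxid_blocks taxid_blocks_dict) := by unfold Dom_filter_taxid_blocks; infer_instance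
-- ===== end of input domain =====

-- B replaces A's single break/overwrite loop per taxid block by two independent
-- selection passes (first scientific-name entry, else last synonym entry); objective: alternative decomposition, same cost.

-- ===== PORT A =====
def SCIENTIFIC_NAME_TAG : String := "scientific name"

def SYNONYM_NAME_TAG : String := "synonym"

-- inner 'for name_datum in name_data' loop of A, with its break / overwrite / fall-through
def pvFilterLoopA : List (List String) → String → String → String × String
  | [], final_name, final_name_type => (final_name, final_name_type)
  | name_datum :: rest, final_name, final_name_type =>
    match PySem.List.pyGet? name_datum 0, PySem.List.pyGet? name_datum 1 with
    | some name_candidate, some name_type_candidate =>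
      if PySem.Str.isIn SCIENTIFIC_NAME_TAG name_type_candidate then
        (name_candidate, name_type_candidate)   -- break
      else if PySem.Str.isIn SYNONYM_NAME_TAG name_type_candidate then
        pvFilterLoopA rest name_candidate name_type_candidate
      else
        pvFilterLoopA rest final_name final_name_type
    | _, _ => (final_name, final_name_type)   -- IndexError in Python: excluded by Pre_

def filter_taxid_blocks (taxid_blocks_dict : List (String × List (List String))) : List (String × List String) :=
  (taxid_blocks_dict.foldl
    (fun taxids p =>
      let r := pvFilterLoopA p.2 "N/A" "N/A"
      PySem.Dict.insert taxids p.1 [r.1, r.2])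
    PySem.Dict.empty).items

-- ===== PORT B =====
def pvHasTag (tag : String) (nd : List String) : Bool :=
  ((PySem.List.pyGet? nd 1).map (fun t => PySem.Str.isIn tag t)).getD false

def pvEntryPair (nd : List String) : List String :=
  [(PySem.List.pyGet? nd 0).getD "", (PySem.List.pyGet? nd 1).getD ""]

def pvChoose (name_data : List (List String)) : List String :=
  match name_data.find? (pvHasTag SCIENTIFIC_NAME_TAG) with
  | some sci => pvEntryPair sci
  | none =>
    match (name_data.filter (pvHasTag SYNONYM_NAME_TAG)).getLast? with
    | some syn => pvEntryPair syn
    | none => ["N/A", "N/A"]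

def filter_taxid_blocks_alt (taxid_blocks_dict : List (String × List (List String))) : List (String × List String) :=
  (taxid_blocks_dict.foldl
    (fun result p => PySem.Dict.insert result p.1 (pvChoose p.2))
    PySem.Dict.empty).items

-- ===== PRECONDITION & SPEC =====
-- an entry with both fields whose type carries the scientific-name tag (A breaks there)
def pvFullSci (nd : List String) : Bool :=
  decide (2 ≤ nd.length) && PySem.Str.isIn SCIENTIFIC_NAME_TAG (nd.getD 1 "")

-- Pre_ excludes exactly the inputs on which Python A raises IndexError: a name entry with fewer
-- than two fields that is not preceded (in its block) by a scientific-name entry A breaks on.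
def Pre_filter_taxid_blocks (taxid_blocks_dict : List (String × List (List String))) : Prop :=
  ∀ p ∈ taxid_blocks_dict, ∀ i ∈ List.range p.2.length, (p.2.getD i []).length < 2 →
    ∃ j ∈ List.range i, pvFullSci (p.2.getD j []) = true
instance (taxid_blocks_dict : List (String × List (List String))) : Decidable (Pre_filter_taxid_blocks taxid_blocks_dict) := by unfold Pre_filter_taxid_blocks; infer_instance

def pvWitness_filter_taxid_blocks : (List (String × List (List String))) :=
  [("9606", [["human", "genbank common name"], ["Homo sapiens", "scientific name"]])]

def Spec_filter_taxid_blocks (taxid_blocks_dict : List (String × List (List String))) (out : List (String × List String)) : Prop := out = filter_taxid_blocks_alt taxid_blocks_dict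
instance (taxid_blocks_dict : List (String × List (List String))) (out : List (String × List String)) : Decidable (Spec_filter_taxid_blocks taxid_blocks_dict out) := by unfold Spec_filter_taxid_blocks; infer_instance

-- ===== CLAIM (what is proved, stated in full; the proofs are below) =====
def Claim_equal_filter_taxid_blocks : Prop := ∀ (taxid_blocks_dict : List (String × List (List String))), Dom_filter_taxid_blocks taxid_blocks_dict → Pre_filter_taxid_blocks taxid_blocks_dict → Spec_filter_taxid_blocks taxid_blocks_dict (filter_taxid_blocks taxid_blocks_dict)

-- ===== LEMMAS AND PROOFS =====

-- characterisation of A's inner loop as B's two selection passes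
theorem pvFilterLoopA_eq (l : List (List String)) (fn ft : String)
    (h : ∀ i ∈ List.range l.length, (l.getD i []).length < 2 →
      ∃ j ∈ List.range i, pvFullSci (l.getD j []) = true) :
    pvFilterLoopA l fn ft =
      match l.find? (pvHasTag SCIENTIFIC_NAME_TAG) with
      | some sci => ((PySem.List.pyGet? sci 0).getD "", (PySem.List.pyGet? sci 1).getD "")
      | none =>
        match (l.filter (pvHasTag SYNONYM_NAME_TAG)).getLast? with
        | some syn => ((PySem.List.pyGet? syn 0).getD "", (PySem.List.pyGet? syn 1).getD "")
        | none => (fn, ft) := by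
  induction l generalizing fn ft with
  | nil => rfl
  | cons nd rest ih =>
    have hnd : 2 ≤ nd.length := by
      by_contra hc
      obtain ⟨j, hj, -⟩ := h 0 (by simp) (by simpa using hc)
      simp at hj
    obtain ⟨a, b, t, rfl⟩ : ∃ a b t, nd = a :: b :: t := by
      match nd with
      | a :: b :: t => exact ⟨a, b, t, rfl⟩
    have ha : PySem.List.pyGet? (a :: b :: t) (0 : Int) = some a := PySem.List.pyGet?_zero_cons ..
    have hb : PySem.List.pyGet? (a :: b :: t) (1 : Int) = some b := by
      simp [PySem.List.pyGet?, PySem.List.pyIdx?]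
    have htag : ∀ tag, pvHasTag tag (a :: b :: t) = PySem.Str.isIn tag b := by
      intro tag; simp only [pvHasTag, hb, Option.map_some, Option.getD_some]
    by_cases hsci : PySem.Str.isIn SCIENTIFIC_NAME_TAG b = true
    · rw [List.find?_cons_of_pos (by rw [htag]; exact hsci)]
      simp only [pvFilterLoopA, ha, hb, hsci, if_pos]
      rfl
    · have hrest : ∀ i ∈ List.range rest.length, (rest.getD i []).length < 2 →
          ∃ j ∈ List.range i, pvFullSci (rest.getD j []) = true := by
        intro i hi hshort
        have hi' : i < rest.length := List.mem_range.mp hi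
        obtain ⟨j, hj, hfs⟩ := h (i + 1) (by simp [List.mem_range]; omega)
          (by simpa using hshort)
        have hj' : j < i + 1 := List.mem_range.mp hj
        cases j with
        | zero =>
          exfalso
          have : PySem.Str.isIn SCIENTIFIC_NAME_TAG b = true := by
            simpa [pvFullSci] using hfs
          exact hsci this
        | succ k =>
          exact ⟨k, List.mem_range.mpr (by omega), by simpa using hfs⟩
      rw [List.find?_cons_of_neg (by rw [htag]; simpa using hsci)]
      have step : pvFilterLoopA ((a :: b :: t) :: rest) fn ft =
          if PySem.Str.isIn SYNONYM_NAME_TAG b = true then pvFilterLoopA rest a b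
          else pvFilterLoopA rest fn ft := by
        simp only [pvFilterLoopA, ha, hb]
        rw [if_neg (by simpa using hsci)]
      rw [step]
      by_cases hsyn : PySem.Str.isIn SYNONYM_NAME_TAG b = true
      · rw [if_pos hsyn, ih _ _ hrest,
            List.filter_cons_of_pos (by rw [htag]; exact hsyn)]
        rcases hf : rest.find? (pvHasTag SCIENTIFIC_NAME_TAG) with _ | sci
        · rcases hg : (rest.filter (pvHasTag SYNONYM_NAME_TAG)).getLast? with _ | syn
          · have : (rest.filter (pvHasTag SYNONYM_NAME_TAG)) = [] :=
              List.getLast?_eq_none_iff.mp hg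
            simp [this, ha]
          · have hne : (rest.filter (pvHasTag SYNONYM_NAME_TAG)) ≠ [] := by
              intro e; rw [e] at hg; simp at hg
            have : ((a :: b :: t) :: rest.filter (pvHasTag SYNONYM_NAME_TAG)).getLast? =
                (rest.filter (pvHasTag SYNONYM_NAME_TAG)).getLast? := by
              cases e : rest.filter (pvHasTag SYNONYM_NAME_TAG) with
              | nil => exact absurd e hne
              | cons y ys => simp [List.getLast?_cons_cons]
            rw [this, hg]
        · rfl
      · rw [if_neg hsyn, ih _ _ hrest,
            List.filter_cons_of_neg (by rw [htag]; simpa using hsyn)]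

theorem pvBlock_eq (l : List (List String))
    (h : ∀ i ∈ List.range l.length, (l.getD i []).length < 2 →
      ∃ j ∈ List.range i, pvFullSci (l.getD j []) = true) :
    [(pvFilterLoopA l "N/A" "N/A").1, (pvFilterLoopA l "N/A" "N/A").2] = pvChoose l := by
  rw [pvFilterLoopA_eq l _ _ h]
  unfold pvChoose pvEntryPair
  rcases hf : l.find? (pvHasTag SCIENTIFIC_NAME_TAG) with _ | sci
  · rcases hg : (l.filter (pvHasTag SYNONYM_NAME_TAG)).getLast? with _ | syn <;> simp
  · simp

theorem pvFold_eq (d : List (String × List (List String)))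
    (hpre : ∀ p ∈ d, ∀ i ∈ List.range p.2.length, (p.2.getD i []).length < 2 →
      ∃ j ∈ List.range i, pvFullSci (p.2.getD j []) = true)
    (acc : PySem.Dict String (List String)) :
    d.foldl (fun taxids p =>
        let r := pvFilterLoopA p.2 "N/A" "N/A"
        PySem.Dict.insert taxids p.1 [r.1, r.2]) acc
      = d.foldl (fun result p => PySem.Dict.insert result p.1 (pvChoose p.2)) acc := by
  induction d generalizing acc with
  | nil => rfl
  | cons p rest ih =>
    simp only [List.foldl_cons]
    rw [show ([(pvFilterLoopA p.2 "N/A" "N/A").1, (pvFilterLoopA p.2 "N/A" "N/A").2] : List String)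
          = pvChoose p.2 from pvBlock_eq p.2 (hpre p (List.mem_cons_self ..))]
    exact ih (fun q hq => hpre q (List.mem_cons_of_mem _ hq)) _

-- ===== VERDICT (by name: the statement is the Claim_ definition above) =====
theorem filter_taxid_blocks_spec : Claim_equal_filter_taxid_blocks := by
  intro d _ hpre
  unfold Spec_filter_taxid_blocks filter_taxid_blocks filter_taxid_blocks_alt
  rw [pvFold_eq d hpre PySem.Dict.empty]
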